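-- pv_equiv track=rewrite | github.com/leodavid0109/Fundamentos_Programaci-n_Python | Módulo 8; Aplicaciones (parte 2)/Juego de ordenamiento.py | ordenamiento
-- ===== SOURCE A (Python) =====
-- def ordenamiento(lista) :
--     orden = []
--     ordenada = sorted(lista)
--     for j in range(len(lista)) :
--         for i in range(len(lista)) :
--             if lista[i] == ordenada[j] :
--                 orden.append(i+1)
--                 break
--     return orden
-- ===== SOURCE B (Python) =====
-- def ordenamiento(lista):
--     # argsort: indices sorted (stably) by value; then one scan propagating
--     # the head of each run of equal values (the first occurrence's 1-based index)
--     indices = sorted(range(len(lista)), key=lambda i: lista[i])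
--     res = []
--     for i in indices:
--         if res and lista[res[-1] - 1] == lista[i]:
--             res.append(res[-1])
--         else:
--             res.append(i + 1)
--     return res
-- ===== Notes on version B (the rewrite author's own statement) =====
-- stated objective: faster
-- what changed: Replace the quadratic per-element linear search by an argsort (stable sort of the index list keyed by value) followed by a single run-head-propagating scan: the head of each run of equal values is the first occurrence, and its 1-based index is repeated across the run.
import Mathlib
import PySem

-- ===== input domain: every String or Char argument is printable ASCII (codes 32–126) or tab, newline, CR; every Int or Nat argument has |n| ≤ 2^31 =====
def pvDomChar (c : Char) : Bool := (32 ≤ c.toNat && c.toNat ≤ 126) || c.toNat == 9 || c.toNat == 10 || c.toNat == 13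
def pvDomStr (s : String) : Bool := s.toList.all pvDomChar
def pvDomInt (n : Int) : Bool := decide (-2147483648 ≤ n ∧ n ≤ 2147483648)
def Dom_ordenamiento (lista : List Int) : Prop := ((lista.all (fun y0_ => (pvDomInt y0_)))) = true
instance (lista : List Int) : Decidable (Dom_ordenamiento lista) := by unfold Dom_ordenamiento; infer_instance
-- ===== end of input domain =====

-- B replaces A's quadratic per-element linear search by an argsort (stable sort of the
-- index list keyed by value) and one run-head-propagating scan (objective: faster).

-- ===== PORT A =====
-- inner 'for i in range(len(lista)): if lista[i] == v: orden.append(i+1); break'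
-- as structural recursion over the list carrying the running index i
def ordInner : List Int → Int → Int → List Int
  | [], _, _ => []
  | x :: xs, v, i => if x = v then [i + 1] else ordInner xs v (i + 1)

def ordenamiento (lista : List Int) : List Int :=
  let ordenada := PySem.List.sorted lista (fun x => x) false
  (PySem.List.pyRange 0 lista.length 1).foldl
    (fun orden j => orden ++ ordInner lista (PySem.List.pyGetD ordenada j 0) 0) []

-- ===== PORT B =====
-- 'sorted(range(len(lista)), key=lambda i: lista[i])' then the run-head scan;
-- 'if res and lista[res[-1]-1] == lista[i]' — res[-1] on a nonempty list is its last
-- element, so 'res.getLast?' covers both the emptiness test and the lookup exactly;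
-- all pyGetD indices here are in range, where pyGetD is exact.
def ordenamiento_alt (lista : List Int) : List Int :=
  let indices := PySem.List.sorted (PySem.List.pyRange 0 lista.length 1)
      (fun i => PySem.List.pyGetD lista i 0) false
  indices.foldl (fun res i =>
    match res.getLast? with
    | some t =>
        if PySem.List.pyGetD lista (t - 1) 0 = PySem.List.pyGetD lista i 0 then res ++ [t]
        else res ++ [i + 1]
    | none => res ++ [i + 1]) []

-- ===== PRECONDITION & SPEC =====
def Spec_ordenamiento (lista : List Int) (out : List Int) : Prop := out = ordenamiento_alt lista
instance (lista : List Int) (out : List Int) : Decidable (Spec_ordenamiento lista out) := by unfold Spec_ordenamiento; infer_instance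

-- ===== CLAIM (what is proved, stated in full; the proofs are below) =====
def Claim_equal_ordenamiento : Prop := ∀ (lista : List Int), Dom_ordenamiento lista → Spec_ordenamiento lista (ordenamiento lista)

-- ===== LEMMAS AND PROOFS =====

-- value at index i (the sort key of B's argsort)
def kf (lista : List Int) (i : Int) : Int := PySem.List.pyGetD lista i 0

-- first occurrence (1-based) of v in the list, scanning from running index i
def firstOpt : List Int → Int → Int → Option Int
  | [], _, _ => none
  | x :: xs, v, i => if x = v then some (i + 1) else firstOpt xs v (i + 1)

theorem ordInner_eq_firstOpt (l : List Int) (v i : Int) :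
    ordInner l v i = (firstOpt l v i).toList := by
  induction l generalizing i with
  | nil => simp [ordInner, firstOpt]
  | cons x xs ih =>
      simp only [ordInner, firstOpt]
      split_ifs with h
      · simp
      · exact ih (i + 1)

theorem firstOpt_isSome_of_mem {l : List Int} {v : Int} (h : v ∈ l) (i : Int) :
    (firstOpt l v i).isSome := by
  induction l generalizing i with
  | nil => cases h
  | cons x xs ih =>
      simp only [firstOpt]
      by_cases hx : x = v
      · simp [hx]
      · simp only [hx, if_false]
        rcases List.mem_cons.mp h with h1 | h2
        · exact absurd h1.symm hx
        · exact ih h2 (i + 1)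

theorem flatMap_toList_eq_map_getD (f : Int → Option Int) :
    ∀ (vs : List Int), (∀ v ∈ vs, (f v).isSome) →
      vs.flatMap (fun v => (f v).toList) = vs.map (fun v => (f v).getD 0) := by
  intro vs hvs
  induction vs with
  | nil => simp
  | cons v vs ih =>
      obtain ⟨w, hw⟩ := Option.isSome_iff_exists.mp (hvs v (List.mem_cons_self ..))
      simp only [List.flatMap_cons, List.map_cons, hw, Option.toList_some, Option.getD_some]
      simp only [List.singleton_append, List.cons.injEq, true_and]
      exact ih (fun x hx => hvs x (List.mem_cons_of_mem _ hx))

-- A computes, for each sorted value, (firstOpt).getD 0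
theorem ordenamiento_eq_map (lista : List Int) :
    ordenamiento lista = (PySem.List.sorted lista (fun x => x) false).map
      (fun v => (firstOpt lista v 0).getD 0) := by
  unfold ordenamiento
  have hlen : lista.length = (PySem.List.sorted lista (fun x => x) false).length :=
    (PySem.List.length_sorted lista _ _).symm
  rw [PySem.List.foldl_append_eq_flatMap, List.nil_append, hlen]
  have hmap := PySem.List.map_pyGetD_pyRange_zero'
      (PySem.List.sorted lista (fun x => x) false) (0 : Int)
  calc (PySem.List.pyRange 0 ((PySem.List.sorted lista (fun x => x) false).length) 1).flatMap
          (fun j => ordInner lista (PySem.List.pyGetD (PySem.List.sorted lista (fun x => x) false) j 0) 0)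
      = ((PySem.List.pyRange 0 ((PySem.List.sorted lista (fun x => x) false).length) 1).map
          (fun j => PySem.List.pyGetD (PySem.List.sorted lista (fun x => x) false) j 0)).flatMap
          (fun v => ordInner lista v 0) := by
        rw [List.flatMap_map]
    _ = (PySem.List.sorted lista (fun x => x) false).flatMap (fun v => ordInner lista v 0) := by
        rw [hmap]
    _ = _ := by
        simp only [fun v => ordInner_eq_firstOpt lista v 0]
        apply flatMap_toList_eq_map_getD
        intro v hv
        exact firstOpt_isSome_of_mem ((PySem.List.mem_sorted ..).mp hv) 0

-- ---- B side: the scan, recast as structural recursion ----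

def stepB (lista : List Int) (last : Option Int) (i : Int) : Int :=
  match last with
  | some t => if PySem.List.pyGetD lista (t - 1) 0 = PySem.List.pyGetD lista i 0 then t else i + 1
  | none => i + 1

def scanB (lista : List Int) : Option Int → List Int → List Int
  | _, [] => []
  | last, i :: is => stepB lista last i :: scanB lista (some (stepB lista last i)) is

theorem foldl_eq_scanB (lista : List Int) :
    ∀ (js res : List Int),
      js.foldl (fun res i =>
        match res.getLast? with
        | some t =>
            if PySem.List.pyGetD lista (t - 1) 0 = PySem.List.pyGetD lista i 0 then res ++ [t]
            else res ++ [i + 1]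
        | none => res ++ [i + 1]) res = res ++ scanB lista res.getLast? js := by
  intro js
  induction js with
  | nil => intro res; simp [scanB]
  | cons i is ih =>
      intro res
      have hstep : (match res.getLast? with
          | some t =>
              if PySem.List.pyGetD lista (t - 1) 0 = PySem.List.pyGetD lista i 0 then res ++ [t]
              else res ++ [i + 1]
          | none => res ++ [i + 1]) = res ++ [stepB lista res.getLast? i] := by
        unfold stepB
        cases res.getLast? with
        | none => rfl
        | some t => by_cases h : PySem.List.pyGetD lista (t - 1) 0 = PySem.List.pyGetD lista i 0 <;> simp [h]
      rw [List.foldl_cons, hstep, ih]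
      rw [List.getLast?_concat]
      simp [scanB]

-- the lexicographic (value, index) order B's stable argsort realizes
theorem lex_le {lista : List Int} {a b : Int}
    (h : kf lista a < kf lista b ∨ (kf lista a = kf lista b ∧ a < b)) :
    kf lista a ≤ kf lista b := by
  rcases h with h | ⟨h, _⟩
  · exact le_of_lt h
  · exact le_of_eq h

-- firstOpt finds exactly the minimal index of v
theorem firstOpt_eq_of_min (l : List Int) (v : Int) :
    ∀ (m : ℕ) (hm : m < l.length), l[m] = v → (∀ p (hp : p < m), l[p]'(by omega) ≠ v) →
      ∀ (i : Int), firstOpt l v i = some (i + m + 1) := by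
  induction l with
  | nil => intro m hm; simp at hm
  | cons x xs ih =>
      intro m hm hv hmin i
      simp only [firstOpt]
      by_cases hx : x = v
      · have hm0 : m = 0 := by
          by_contra h0
          exact hmin 0 (by omega) hx
        subst hm0
        simp [hx]
      · have hm0 : m ≠ 0 := by
          intro h0; subst h0; exact hx (by simpa using hv)
        simp only [hx, if_false]
        obtain ⟨k, rfl⟩ := Nat.exists_eq_succ_of_ne_zero hm0
        have hk : k < xs.length := by simp at hm; omega
        have hv' : xs[k]'hk = v := by simpa using hv
        have := ih k hk hv'
          (fun p hp => by
            have := hmin (p + 1) (by omega)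
            simpa using this) (i + 1)
        rw [this]
        congr 1
        push_cast
        ring

theorem kf_eq_getElem (lista : List Int) (j : ℕ) (hj : j < lista.length) :
    kf lista (j : Int) = lista[j] := by
  unfold kf
  rw [PySem.List.pyGetD_eq_getElem lista 0 (by positivity) (by exact_mod_cast hj)]
  simp

-- run-head scan correctness
theorem scanB_spec (lista : List Int) :
    ∀ (js : List Int) (last : Option Int),
      List.Pairwise (fun a b => kf lista a < kf lista b ∨ (kf lista a = kf lista b ∧ a < b)) js →
      (∀ i ∈ js, 0 ≤ i ∧ i < (lista.length : Int)) →
      (∀ t, last = some t →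
          firstOpt lista (kf lista (t - 1)) 0 = some t ∧
          (∀ i ∈ js, kf lista (t - 1) ≤ kf lista i)) →
      (∀ i ∈ js, ∀ j : Int, 0 ≤ j → j < i → kf lista j = kf lista i →
          j ∈ js ∨ ∃ t, last = some t ∧ kf lista (t - 1) = kf lista i) →
      scanB lista last js = js.map (fun i => (firstOpt lista (kf lista i) 0).getD 0) := by
  intro js
  induction js with
  | nil => intro last _ _ _ _; simp [scanB]
  | cons h is ih =>
      intro last hpw hrange hlast hdown
      have hpw_tail := hpw.sublist (List.sublist_cons_self h is)
      have hpw_head : ∀ b ∈ is, kf lista h < kf lista b ∨ (kf lista h = kf lista b ∧ h < b) :=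
        (List.pairwise_cons.mp hpw).1
      have hhr := hrange h (List.mem_cons_self ..)
      -- is the test true? (mid-run)
      by_cases hmid : ∃ t, last = some t ∧ kf lista (t - 1) = kf lista h
      · -- same-run branch: output t, the preserved first-occurrence index
        obtain ⟨t, hlt, hkt⟩ := hmid
        obtain ⟨hfo, hle⟩ := hlast t hlt
        have hstep : stepB lista last h = t := by
          subst hlt; unfold stepB
          simp only [show (PySem.List.pyGetD lista (t-1) 0 = PySem.List.pyGetD lista h 0) from hkt, if_true]
        have hout : (firstOpt lista (kf lista h) 0).getD 0 = t := by
          rw [← hkt, hfo]; rfl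
        simp only [scanB, List.map_cons, hstep, hout]
        congr 1
        apply ih (some t)
        · exact hpw_tail
        · exact fun i hi => hrange i (List.mem_cons_of_mem _ hi)
        · intro t' ht'
          cases ht'
          exact ⟨hfo, fun i hi => hle i (List.mem_cons_of_mem _ hi)⟩
        · intro i hi j hj0 hji hkji
          rcases hdown i (List.mem_cons_of_mem _ hi) j hj0 hji hkji with hjm | ⟨t', hlt', hkt'⟩
          · rcases List.mem_cons.mp hjm with rfl | hjis
            · -- j = h: prev key equals key i
              right
              refine ⟨t, rfl, ?_⟩
              rw [hkt]; exact hkji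
            · exact Or.inl hjis
          · right
            cases hlt.symm.trans hlt'
            exact ⟨t, rfl, hkt'⟩
      · -- new-run branch: h is the global first occurrence of its value
        have hnoprev : ∀ j : Int, 0 ≤ j → j < h → kf lista j ≠ kf lista h := by
          intro j hj0 hji hkji
          rcases hdown h (List.mem_cons_self ..) j hj0 hji hkji with hjm | hcl
          · rcases List.mem_cons.mp hjm with rfl | hjis
            · omega
            · rcases hpw_head j hjis with hlt' | ⟨_, hlt'⟩
              · rw [hkji] at hlt'; exact absurd hlt' (lt_irrefl _)
              · omega
          · exact hmid hcl
        have hstep : stepB lista last h = h + 1 := by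
          unfold stepB
          cases hl : last with
          | none => rfl
          | some t =>
              have : ¬ (PySem.List.pyGetD lista (t-1) 0 = PySem.List.pyGetD lista h 0) := by
                intro heq
                exact hmid ⟨t, hl, heq⟩
              simp [this]
        -- firstOpt finds h itself
        have hhn : h.toNat < lista.length := by omega
        have hfo : firstOpt lista (kf lista h) 0 = some (h + 1) := by
          have hv : lista[h.toNat] = kf lista h := by
            rw [← kf_eq_getElem lista h.toNat hhn]
            congr 1; omega
          have hmin : ∀ p (hp : p < h.toNat), lista[p]'(by omega) ≠ kf lista h := by
            intro p hp heq
            exact hnoprev (p : Int) (by positivity) (by omega)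
              (by rw [kf_eq_getElem lista p (by omega)]; exact heq)
          have := firstOpt_eq_of_min lista (kf lista h) h.toNat hhn hv hmin 0
          rw [this]
          congr 1
          omega
        have hout : (firstOpt lista (kf lista h) 0).getD 0 = h + 1 := by rw [hfo]; rfl
        simp only [scanB, List.map_cons, hstep, hout]
        congr 1
        apply ih (some (h + 1))
        · exact hpw_tail
        · exact fun i hi => hrange i (List.mem_cons_of_mem _ hi)
        · intro t' ht'
          cases ht'
          have hkh : kf lista (h + 1 - 1) = kf lista h := by norm_num
          constructor
          · rw [hkh]; exact hfo
          · intro i hi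
            rw [hkh]
            exact lex_le (hpw_head i hi)
        · intro i hi j hj0 hji hkji
          rcases hdown i (List.mem_cons_of_mem _ hi) j hj0 hji hkji with hjm | ⟨t', hlt', hkt'⟩
          · rcases List.mem_cons.mp hjm with heq | hjis
            · right
              refine ⟨h + 1, rfl, ?_⟩
              rw [show h + 1 - 1 = h by ring, ← heq]
              exact hkji
            · exact Or.inl hjis
          · -- old-last clause: its key is sandwiched, so key h = key i works too
            obtain ⟨hfo', hle'⟩ := hlast t' hlt'
            have h1 : kf lista (t' - 1) ≤ kf lista h := hle' h (List.mem_cons_self ..)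
            have h2 : kf lista h ≤ kf lista i := lex_le (hpw_head i hi)
            have h3 : kf lista h = kf lista i := le_antisymm h2 (hkt' ▸ h1)
            right
            refine ⟨h + 1, rfl, ?_⟩
            rw [show h + 1 - 1 = h by ring]
            exact h3

-- ---- stability of the argsort (pairwise lexicographic on (value, index)) ----

theorem insertBy_pairwise_lex (lista : List Int) (x : Int) :
    ∀ (acc : List Int),
      List.Pairwise (fun a b => kf lista a < kf lista b ∨ (kf lista a = kf lista b ∧ a < b)) acc →
      (∀ a ∈ acc, a < x) →
      List.Pairwise (fun a b => kf lista a < kf lista b ∨ (kf lista a = kf lista b ∧ a < b))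
        (PySem.List.insertBy (fun a b => decide (kf lista a < kf lista b)) x acc) := by
  intro acc
  induction acc with
  | nil => intro _ _; simp [PySem.List.insertBy]
  | cons y ys ih =>
      intro hpw hlt
      have hy := hlt y (List.mem_cons_self ..)
      obtain ⟨hhead, htail⟩ := List.pairwise_cons.mp hpw
      simp only [PySem.List.insertBy]
      by_cases hc : kf lista x < kf lista y
      · simp only [hc, decide_true, if_true]
        refine List.pairwise_cons.mpr ⟨?_, hpw⟩
        intro b hb
        rcases List.mem_cons.mp hb with rfl | hbys
        · exact Or.inl hc
        · exact Or.inl (lt_of_lt_of_le hc (lex_le (hhead b hbys)))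
      · simp only [hc, decide_false]
        refine List.pairwise_cons.mpr ⟨?_, ih htail (fun a ha => hlt a (List.mem_cons_of_mem _ ha))⟩
        intro b hb
        rcases (PySem.List.mem_insertBy _ _ _ _).mp hb with rfl | hbys
        · rcases lt_or_eq_of_le (le_of_not_gt hc) with h | h
          · exact Or.inl h
          · exact Or.inr ⟨h, hy⟩
        · exact hhead b hbys

theorem foldl_insertBy_pairwise_lex (lista : List Int) :
    ∀ (xs acc : List Int),
      List.Pairwise (· < ·) xs →
      List.Pairwise (fun a b => kf lista a < kf lista b ∨ (kf lista a = kf lista b ∧ a < b)) acc →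
      (∀ a ∈ acc, ∀ x ∈ xs, a < x) →
      List.Pairwise (fun a b => kf lista a < kf lista b ∨ (kf lista a = kf lista b ∧ a < b))
        (xs.foldl (fun acc x => PySem.List.insertBy (fun a b => decide (kf lista a < kf lista b)) x acc) acc) := by
  intro xs
  induction xs with
  | nil => intro acc _ hacc _; simpa using hacc
  | cons x xs ih =>
      intro acc hxs hacc hcross
      obtain ⟨hxhead, hxs_tail⟩ := List.pairwise_cons.mp hxs
      simp only [List.foldl_cons]
      apply ih _ hxs_tail
      · exact insertBy_pairwise_lex lista x acc hacc
          (fun a ha => hcross a ha x (List.mem_cons_self ..))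
      · intro a ha x' hx'
        rcases (PySem.List.mem_insertBy _ _ _ _).mp ha with rfl | haacc
        · exact hxhead x' hx'
        · exact hcross a haacc x' (List.mem_cons_of_mem _ hx')

theorem sorted_indices_pairwise_lex (lista : List Int) :
    List.Pairwise (fun a b => kf lista a < kf lista b ∨ (kf lista a = kf lista b ∧ a < b))
      (PySem.List.sorted (PySem.List.pyRange 0 lista.length 1) (kf lista) false) := by
  rw [PySem.List.sorted_eq_foldl_insertBy]
  exact foldl_insertBy_pairwise_lex lista _ []
    (PySem.List.pairwise_lt_pyRange_one 0 lista.length) (by simp) (by simp)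

-- ---- mapping the argsort through the key gives sorted(lista) ----

theorem map_insertBy_key (lista : List Int) (x : Int) :
    ∀ (ys : List Int),
      (PySem.List.insertBy (fun a b => decide (kf lista a < kf lista b)) x ys).map (kf lista)
        = PySem.List.insertBy (fun a b => decide (a < b)) (kf lista x) (ys.map (kf lista)) := by
  intro ys
  induction ys with
  | nil => simp [PySem.List.insertBy]
  | cons y ys ih =>
      simp only [PySem.List.insertBy, List.map_cons]
      by_cases hc : kf lista x < kf lista y
      · simp [hc]
      · simp [hc, ih]

theorem map_foldl_insertBy_key (lista : List Int) :
    ∀ (xs acc : List Int),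
      (xs.foldl (fun acc x => PySem.List.insertBy (fun a b => decide (kf lista a < kf lista b)) x acc) acc).map (kf lista)
        = (xs.map (kf lista)).foldl (fun acc v => PySem.List.insertBy (fun a b => decide (a < b)) v acc) (acc.map (kf lista)) := by
  intro xs
  induction xs with
  | nil => intro acc; simp
  | cons x xs ih =>
      intro acc
      simp only [List.foldl_cons, List.map_cons]
      rw [ih, map_insertBy_key]

theorem map_key_sorted_indices (lista : List Int) :
    (PySem.List.sorted (PySem.List.pyRange 0 lista.length 1) (kf lista) false).map (kf lista)
      = PySem.List.sorted lista (fun x => x) false := by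
  rw [PySem.List.sorted_eq_foldl_insertBy, map_foldl_insertBy_key]
  have hmapkf : (PySem.List.pyRange 0 lista.length 1).map (kf lista) = lista := by
    unfold kf
    exact PySem.List.map_pyGetD_pyRange_zero' lista 0
  rw [hmapkf, List.map_nil, ← PySem.List.sorted_eq_foldl_insertBy]

-- ---- the equivalence ----

theorem ordenamiento_eq (lista : List Int) :
    ordenamiento lista = ordenamiento_alt lista := by
  rw [ordenamiento_eq_map]
  unfold ordenamiento_alt
  have hjs : PySem.List.sorted (PySem.List.pyRange 0 lista.length 1)
      (fun i => PySem.List.pyGetD lista i 0) false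
    = PySem.List.sorted (PySem.List.pyRange 0 lista.length 1) (kf lista) false := rfl
  rw [hjs, foldl_eq_scanB, List.getLast?_nil, List.nil_append]
  set js := PySem.List.sorted (PySem.List.pyRange 0 lista.length 1) (kf lista) false with hjsdef
  have hmemjs : ∀ i, i ∈ js ↔ (0 ≤ i ∧ i < (lista.length : Int)) := by
    intro i
    rw [hjsdef, PySem.List.mem_sorted, PySem.List.mem_pyRange_one]
  have hscan := scanB_spec lista js none
    (sorted_indices_pairwise_lex lista)
    (fun i hi => (hmemjs i).mp hi)
    (fun t ht => by cases ht)
    (fun i hi j hj0 hji hk => Or.inl ((hmemjs j).mpr ⟨hj0, lt_trans hji ((hmemjs i).mp hi).2⟩))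
  rw [hscan, ← map_key_sorted_indices lista, List.map_map]
  rfl

-- ===== VERDICT (by name: the statement is the Claim_ definition above) =====
theorem ordenamiento_spec : Claim_equal_ordenamiento := by
  intro lista _
  unfold Spec_ordenamiento
  exact ordenamiento_eq lista
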